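-- pv_equiv track=rewrite | github.com/hjeomdev/CodingTest | python/PGS/P120956.py | solution
-- ===== SOURCE A (Python) =====
-- def solution(babbling):
--     answer = 0
--
--     available = ["aya", "ye", "woo", "ma"]
--
--     for i in range(len(babbling)):
--         cur = babbling[i]
--         for a in available:
--             if a in cur:
--                 cur = cur.replace(a, ' ')
--         if len(cur.strip()) == 0:
--             answer += 1
--
--     return answer
-- ===== SOURCE B (Python) =====
-- def solution(babbling):
--     words = ("aya", "ye", "woo", "ma")
--
--     def ok(s):
--         i = 0
--         n = len(s)
--         while i < n:
--             for w in words: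
--                 if s.startswith(w, i):
--                     i += len(w)
--                     break
--             else:
--                 if s[i].isspace():
--                     i += 1
--                 else:
--                     return False
--         return True
--
--     return sum(1 for s in babbling if ok(s))
-- ===== Notes on version B (the rewrite author's own statement) =====
-- stated objective: alternative
-- what changed: Per string, A builds an intermediate string by four successive str.replace passes (one per word, each after an 'in' scan) and then strips it; B makes a single left-to-right greedy tokenizing scan that consumes one word or one whitespace character at a time (valid because the word set is prefix-free), with no intermediate strings.
import Mathlib
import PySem

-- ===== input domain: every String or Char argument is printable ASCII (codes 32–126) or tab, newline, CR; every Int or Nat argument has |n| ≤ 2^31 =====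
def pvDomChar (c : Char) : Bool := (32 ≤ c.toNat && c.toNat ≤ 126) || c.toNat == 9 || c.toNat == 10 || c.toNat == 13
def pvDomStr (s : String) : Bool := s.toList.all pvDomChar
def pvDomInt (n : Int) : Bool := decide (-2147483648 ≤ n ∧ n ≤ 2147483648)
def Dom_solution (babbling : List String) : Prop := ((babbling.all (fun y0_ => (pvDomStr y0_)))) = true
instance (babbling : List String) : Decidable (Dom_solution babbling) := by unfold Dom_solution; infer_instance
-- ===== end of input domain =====

-- B replaces A's four replace-and-strip passes per string by a single left-to-right
-- greedy tokenizing scan (the word set is prefix-free, so greedy scanning is exact).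

-- ===== PORT A =====
def solution (babbling : List String) : Int :=
  (PySem.List.pyRange 0 (PySem.List.len babbling)).foldl
    (fun answer i =>
      if PySem.Str.len (PySem.Str.strip
          ((["aya", "ye", "woo", "ma"] : List String).foldl
            (fun cur a => if PySem.Str.isIn a cur then PySem.Str.replace cur a " " else cur)
            (PySem.List.pyGetD babbling i ""))) == 0
      then answer + 1 else answer)
    0

-- ===== PORT B =====
-- Source B's `ok`: scan left to right; at each position consume one word (s.startswith(w, i))
-- or one whitespace character, else fail
def okB : List Char → Bool
  | [] => true
  | c :: t =>
    if ['a','y','a'].isPrefixOf (c :: t) then okB (t.drop 2)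
    else if ['y','e'].isPrefixOf (c :: t) then okB (t.drop 1)
    else if ['w','o','o'].isPrefixOf (c :: t) then okB (t.drop 2)
    else if ['m','a'].isPrefixOf (c :: t) then okB (t.drop 1)
    else if PySem.Chars.isspace c then okB t
    else false
  termination_by l => l.length
  decreasing_by all_goals (simp only [List.length_drop, List.length_cons]; omega)

def solution_alt (babbling : List String) : Int :=
  ((babbling.countP (fun s => okB s.toList) : Nat) : Int)

-- ===== PRECONDITION & SPEC =====
def Spec_solution (babbling : List String) (out : Int) : Prop := out = solution_alt babbling
instance (babbling : List String) (out : Int) : Decidable (Spec_solution babbling out) := by unfold Spec_solution; infer_instance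

-- ===== CLAIM (what is proved, stated in full; the proofs are below) =====
def Claim_equal_solution : Prop := ∀ (babbling : List String), Dom_solution babbling → Spec_solution babbling (solution babbling)

-- ===== LEMMAS AND PROOFS =====

-- leftmost non-overlapping replacement of `pat` by one space (A's cur.replace(a, ' '))
def rep (pat : List Char) : List Char → List Char
  | [] => []
  | c :: t =>
    if pat.isPrefixOf (c :: t) then ' ' :: rep pat (t.drop (pat.length - 1))
    else c :: rep pat t
  termination_by l => l.length
  decreasing_by all_goals (simp only [List.length_drop, List.length_cons]; omega)

lemma rep_nil (pat : List Char) : rep pat [] = [] := by rw [rep]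

lemma bfalse (b : Bool) (h : ¬ b = true) : b = false := by
  cases b
  · rfl
  · exact absurd rfl h

lemma rep_pos (pat c t) (h : pat.isPrefixOf (c :: t) = true) :
    rep pat (c :: t) = ' ' :: rep pat (t.drop (pat.length - 1)) := by
  rw [rep, if_pos h]

lemma rep_neg (pat c t) (h : pat.isPrefixOf (c :: t) = false) :
    rep pat (c :: t) = c :: rep pat t := by
  rw [rep, if_neg (by simp [h])]

lemma ipo_ne (p c : Char) (ps t : List Char) (h : p ≠ c) :
    (p :: ps).isPrefixOf (c :: t) = false := by
  simp [List.isPrefixOf, h]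

lemma ipo_cons (p : Char) (ps t : List Char) :
    (p :: ps).isPrefixOf (p :: t) = ps.isPrefixOf t := by
  simp [List.isPrefixOf]

lemma go_rep (pat : List Char) (hp : pat ≠ []) :
    ∀ (fuel : Nat) (l acc : List Char), l.length ≤ fuel →
      PySem.Chars.replace.go pat [' '] fuel l acc = acc.reverse ++ rep pat l := by
  intro fuel
  induction fuel with
  | zero =>
    intro l acc h
    have : l = [] := List.eq_nil_of_length_eq_zero (by omega)
    subst this
    simp [PySem.Chars.replace.go, rep_nil]
  | succ n ih =>
    intro l acc h
    cases l with
    | nil => simp [PySem.Chars.replace.go, rep_nil]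
    | cons c t =>
      by_cases hpre : pat.isPrefixOf (c :: t)
      · have hlen : 1 ≤ pat.length := by
          cases pat with
          | nil => exact absurd rfl hp
          | cons _ _ => simp
        have hdrop : List.drop pat.length (c :: t) = t.drop (pat.length - 1) := by
          obtain ⟨k, hk⟩ : ∃ k, pat.length = k + 1 := ⟨pat.length - 1, by omega⟩
          simp [hk]
        rw [PySem.Chars.replace.go, if_pos hpre, hdrop]
        simp only [List.reverse_cons, List.reverse_nil, List.nil_append, List.singleton_append]
        rw [ih (t.drop (pat.length - 1)) (' ' :: acc)
          (by simp only [List.length_drop]; simp only [List.length_cons] at h; omega)]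
        rw [rep_pos pat c t hpre]
        simp
      · rw [PySem.Chars.replace.go, if_neg hpre,
          ih t (c :: acc) (by simp only [List.length_cons] at h; omega)]
        rw [rep_neg pat c t (bfalse _ hpre)]
        simp

lemma replace_eq_rep (s pat : List Char) (hp : pat ≠ []) :
    PySem.Chars.replace s pat [' '] = rep pat s := by
  rw [PySem.Chars.replace, if_neg (by simpa using hp), go_rep pat hp s.length s [] le_rfl]
  simp

lemma rep_not_infix (pat : List Char) : ∀ s : List Char, ¬ pat <:+: s → rep pat s = s := by
  intro s
  induction s with
  | nil => intro _; exact rep_nil pat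
  | cons c t ih =>
    intro h
    rw [rep_neg pat c t (bfalse _
        (fun hb => h (List.isPrefixOf_iff_prefix.mp hb).isInfix)),
      ih (fun hinf => h (List.infix_cons hinf))]

-- the head of a replacement result is the old head or a space
lemma rep_head (pat : List Char) (d : Char) (r : List Char) :
    ∃ z, rep pat (d :: r) = ' ' :: z ∨ rep pat (d :: r) = d :: z := by
  rw [rep]
  split
  · exact ⟨_, Or.inl rfl⟩
  · exact ⟨_, Or.inr rfl⟩

lemma strip_nil_iff (x : List Char) :
    (PySem.Chars.strip x = []) ↔ x.all PySem.Chars.isspace := by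
  constructor
  · intro h
    have h2 : List.dropWhile PySem.Chars.isspace
        (List.dropWhile PySem.Chars.isspace x).reverse = [] := by
      have := congrArg List.reverse h
      simpa [PySem.Chars.strip, PySem.Chars.rstrip, PySem.Chars.lstrip] using this
    have h3 := List.dropWhile_eq_nil_iff.mp h2
    rw [List.all_eq_true]
    intro c hc
    rcases List.mem_append.mp
        ((List.takeWhile_append_dropWhile (p := PySem.Chars.isspace) (l := x)) ▸ hc) with h4 | h4
    · exact List.mem_takeWhile_imp h4
    · exact h3 c (List.mem_reverse.mpr h4)
  · intro h
    have h1 : List.dropWhile PySem.Chars.isspace x = [] :=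
      List.dropWhile_eq_nil_iff.mpr (fun c hc => List.all_eq_true.mp h c hc)
    simp [PySem.Chars.strip, PySem.Chars.lstrip, PySem.Chars.rstrip, h1]

def repAya : List Char → List Char := rep ['a','y','a']
def repYe  : List Char → List Char := rep ['y','e']
def repWoo : List Char → List Char := rep ['w','o','o']
def repMa  : List Char → List Char := rep ['m','a']

def R (x : List Char) : List Char := repMa (repWoo (repYe (repAya x)))

-- pass-through of one literal-headed replacement over a cons whose head mismatches
lemma R_aya (u : List Char) : R ('a'::'y'::'a'::u) = ' ' :: R u := by
  unfold R repAya repYe repWoo repMa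
  rw [rep_pos ['a','y','a'] _ _ (by simp [List.isPrefixOf])]
  simp only [List.length_cons, List.length_nil, List.drop_succ_cons, List.drop_zero]
  rw [rep_neg ['y','e'] _ _ (ipo_ne _ _ _ _ (by decide)),
    rep_neg ['w','o','o'] _ _ (ipo_ne _ _ _ _ (by decide)),
    rep_neg ['m','a'] _ _ (ipo_ne _ _ _ _ (by decide))]

lemma R_ye (u : List Char) : R ('y'::'e'::u) = ' ' :: R u := by
  unfold R repAya repYe repWoo repMa
  rw [rep_neg ['a','y','a'] _ _ (ipo_ne _ _ _ _ (by decide)),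
    rep_neg ['a','y','a'] _ _ (ipo_ne _ _ _ _ (by decide)),
    rep_pos ['y','e'] _ _ (by rw [ipo_cons]; simp [List.isPrefixOf])]
  simp only [List.length_cons, List.length_nil, List.drop_succ_cons, List.drop_zero]
  rw [rep_neg ['w','o','o'] _ _ (ipo_ne _ _ _ _ (by decide)),
    rep_neg ['m','a'] _ _ (ipo_ne _ _ _ _ (by decide))]

lemma R_woo (u : List Char) : R ('w'::'o'::'o'::u) = ' ' :: R u := by
  unfold R repAya repYe repWoo repMa
  rw [rep_neg ['a','y','a'] _ _ (ipo_ne _ _ _ _ (by decide)),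
    rep_neg ['a','y','a'] _ _ (ipo_ne _ _ _ _ (by decide)),
    rep_neg ['a','y','a'] _ _ (ipo_ne _ _ _ _ (by decide)),
    rep_neg ['y','e'] _ _ (ipo_ne _ _ _ _ (by decide)),
    rep_neg ['y','e'] _ _ (ipo_ne _ _ _ _ (by decide)),
    rep_neg ['y','e'] _ _ (ipo_ne _ _ _ _ (by decide)),
    rep_pos ['w','o','o'] _ _ (by rw [ipo_cons, ipo_cons]; simp [List.isPrefixOf])]
  simp only [List.length_cons, List.length_nil, List.drop_succ_cons, List.drop_zero]
  rw [rep_neg ['m','a'] _ _ (ipo_ne _ _ _ _ (by decide))]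

-- "ma" with no "aya" straddling the boundary
lemma R_ma (u : List Char) (h : (['y','a'].isPrefixOf u) = false) :
    R ('m'::'a'::u) = ' ' :: R u := by
  unfold R repAya repYe repWoo repMa
  rw [rep_neg ['a','y','a'] _ _ (ipo_ne _ _ _ _ (by decide)),
    rep_neg ['a','y','a'] _ _ (by rw [ipo_cons]; exact h),
    rep_neg ['y','e'] _ _ (ipo_ne _ _ _ _ (by decide)),
    rep_neg ['y','e'] _ _ (ipo_ne _ _ _ _ (by decide)),
    rep_neg ['w','o','o'] _ _ (ipo_ne _ _ _ _ (by decide)),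
    rep_neg ['w','o','o'] _ _ (ipo_ne _ _ _ _ (by decide)),
    rep_pos ['m','a'] _ _ (by rw [ipo_cons]; simp [List.isPrefixOf])]
  simp only [List.length_cons, List.length_nil, List.drop_succ_cons, List.drop_zero]

-- "maya…": A consumes the "aya", leaving a bare 'm'
lemma R_ma_aya (v : List Char) : R ('m'::'a'::'y'::'a'::v) = 'm' :: ' ' :: R v := by
  unfold R repAya repYe repWoo repMa
  rw [rep_neg ['a','y','a'] _ _ (ipo_ne _ _ _ _ (by decide)),
    rep_pos ['a','y','a'] _ _ (by rw [ipo_cons]; simp [List.isPrefixOf])]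
  simp only [List.length_cons, List.length_nil, List.drop_succ_cons, List.drop_zero]
  rw [rep_neg ['y','e'] _ _ (ipo_ne _ _ _ _ (by decide)),
    rep_neg ['y','e'] _ _ (ipo_ne _ _ _ _ (by decide)),
    rep_neg ['w','o','o'] _ _ (ipo_ne _ _ _ _ (by decide)),
    rep_neg ['w','o','o'] _ _ (ipo_ne _ _ _ _ (by decide)),
    rep_neg ['m','a'] _ _ (by rw [ipo_cons]; exact ipo_ne _ _ _ _ (by decide)),
    rep_neg ['m','a'] _ _ (ipo_ne _ _ _ _ (by decide))]

-- in the no-token case every replacement passes over the head character unchanged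
lemma R_cons_else (c : Char) (t : List Char)
    (h1 : ['a','y','a'].isPrefixOf (c :: t) = false)
    (h2 : ['y','e'].isPrefixOf (c :: t) = false)
    (h3 : ['w','o','o'].isPrefixOf (c :: t) = false)
    (h4 : ['m','a'].isPrefixOf (c :: t) = false) :
    R (c :: t) = c :: R t := by
  by_cases ha : c = 'a'
  · subst ha
    unfold R repAya repYe repWoo repMa
    rw [rep_neg ['a','y','a'] _ _ h1,
      rep_neg ['y','e'] _ _ (ipo_ne _ _ _ _ (by decide)),
      rep_neg ['w','o','o'] _ _ (ipo_ne _ _ _ _ (by decide)),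
      rep_neg ['m','a'] _ _ (ipo_ne _ _ _ _ (by decide))]
  by_cases hy : c = 'y'
  · subst hy
    unfold R repAya repYe repWoo repMa
    rw [rep_neg ['a','y','a'] _ _ (ipo_ne _ _ _ _ (by decide))]
    have hpass : (['y','e'].isPrefixOf ('y' :: rep ['a','y','a'] t)) = false := by
      rw [ipo_cons]
      cases t with
      | nil => rw [rep_nil]; rfl
      | cons d r =>
        have hd : d ≠ 'e' := by
          intro hd; subst hd
          rw [ipo_cons] at h2
          simp [List.isPrefixOf] at h2
        obtain ⟨z, hz | hz⟩ := rep_head ['a','y','a'] d r <;>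
          rw [hz] <;> exact ipo_ne _ _ _ _ (by first | decide | exact fun he => hd he.symm)
    rw [rep_neg ['y','e'] _ _ hpass,
      rep_neg ['w','o','o'] _ _ (ipo_ne _ _ _ _ (by decide)),
      rep_neg ['m','a'] _ _ (ipo_ne _ _ _ _ (by decide))]
  by_cases hw : c = 'w'
  · subst hw
    unfold R repAya repYe repWoo repMa
    rw [rep_neg ['a','y','a'] _ _ (ipo_ne _ _ _ _ (by decide)),
      rep_neg ['y','e'] _ _ (ipo_ne _ _ _ _ (by decide))]
    have hpass : (['w','o','o'].isPrefixOf
        ('w' :: rep ['y','e'] (rep ['a','y','a'] t))) = false := by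
      rw [ipo_cons]
      cases t with
      | nil => rw [rep_nil, rep_nil]; rfl
      | cons d r =>
        by_cases hdo : d = 'o'
        · subst hdo
          -- t = 'o'::r and from h3, r does not start with 'o'
          rw [rep_neg ['a','y','a'] _ _ (ipo_ne _ _ _ _ (by decide)),
            rep_neg ['y','e'] _ _ (ipo_ne _ _ _ _ (by decide)), ipo_cons]
          cases r with
          | nil => rw [rep_nil, rep_nil]; rfl
          | cons e q =>
            have he : e ≠ 'o' := by
              intro he; subst he
              rw [ipo_cons, ipo_cons] at h3
              simp [List.isPrefixOf] at h3
            obtain ⟨z1, hz1 | hz1⟩ := rep_head ['a','y','a'] e q <;> rw [hz1] <;>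
              [skip; skip] <;>
              (first
                | (obtain ⟨z2, hz2 | hz2⟩ := rep_head ['y','e'] ' ' z1 <;> rw [hz2] <;>
                    exact ipo_ne _ _ _ _ (by decide))
                | (obtain ⟨z2, hz2 | hz2⟩ := rep_head ['y','e'] e z1 <;> rw [hz2] <;>
                    exact ipo_ne _ _ _ _ (by first | decide | exact fun hh => he hh.symm)))
        · obtain ⟨z1, hz1 | hz1⟩ := rep_head ['a','y','a'] d r <;> rw [hz1] <;>
            (first
              | (obtain ⟨z2, hz2 | hz2⟩ := rep_head ['y','e'] ' ' z1 <;> rw [hz2] <;>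
                  exact ipo_ne _ _ _ _ (by decide))
              | (obtain ⟨z2, hz2 | hz2⟩ := rep_head ['y','e'] d z1 <;> rw [hz2] <;>
                  exact ipo_ne _ _ _ _ (by first | decide | exact fun hh => hdo hh.symm)))
    rw [rep_neg ['w','o','o'] _ _ hpass,
      rep_neg ['m','a'] _ _ (ipo_ne _ _ _ _ (by decide))]
  by_cases hm : c = 'm'
  · subst hm
    unfold R repAya repYe repWoo repMa
    rw [rep_neg ['a','y','a'] _ _ (ipo_ne _ _ _ _ (by decide)),
      rep_neg ['y','e'] _ _ (ipo_ne _ _ _ _ (by decide)),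
      rep_neg ['w','o','o'] _ _ (ipo_ne _ _ _ _ (by decide))]
    have hpass : (['m','a'].isPrefixOf
        ('m' :: rep ['w','o','o'] (rep ['y','e'] (rep ['a','y','a'] t)))) = false := by
      rw [ipo_cons]
      cases t with
      | nil => rw [rep_nil, rep_nil, rep_nil]; rfl
      | cons d r =>
        have hd : d ≠ 'a' := by
          intro hd; subst hd
          rw [ipo_cons] at h4
          simp [List.isPrefixOf] at h4
        obtain ⟨z1, hz1 | hz1⟩ := rep_head ['a','y','a'] d r <;> rw [hz1] <;>
          (first
            | (obtain ⟨z2, hz2 | hz2⟩ := rep_head ['y','e'] ' ' z1 <;> rw [hz2] <;>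
                (obtain ⟨z3, hz3 | hz3⟩ := rep_head ['w','o','o'] ' ' z2 <;> rw [hz3] <;>
                  exact ipo_ne _ _ _ _ (by decide)))
            | (obtain ⟨z2, hz2 | hz2⟩ := rep_head ['y','e'] d z1 <;> rw [hz2] <;>
                (first
                  | (obtain ⟨z3, hz3 | hz3⟩ := rep_head ['w','o','o'] ' ' z2 <;> rw [hz3] <;>
                      exact ipo_ne _ _ _ _ (by decide))
                  | (obtain ⟨z3, hz3 | hz3⟩ := rep_head ['w','o','o'] d z2 <;> rw [hz3] <;>
                      exact ipo_ne _ _ _ _ (by first | decide | exact fun hh => hd hh.symm)))))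
    rw [rep_neg ['m','a'] _ _ hpass]
  · -- head differs from every pattern head
    unfold R repAya repYe repWoo repMa
    rw [rep_neg ['a','y','a'] _ _ (ipo_ne _ _ _ _ (fun h => ha h.symm)),
      rep_neg ['y','e'] _ _ (ipo_ne _ _ _ _ (fun h => hy h.symm)),
      rep_neg ['w','o','o'] _ _ (ipo_ne _ _ _ _ (fun h => hw h.symm)),
      rep_neg ['m','a'] _ _ (ipo_ne _ _ _ _ (fun h => hm h.symm))]


lemma main_aux : ∀ (n : Nat) (x : List Char), x.length ≤ n →
    (R x).all PySem.Chars.isspace = okB x := by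
  intro n
  induction n with
  | zero =>
    intro x h
    have : x = [] := List.eq_nil_of_length_eq_zero (by omega)
    subst this
    simp [R, repAya, repYe, repWoo, repMa, rep_nil, okB]
  | succ n ih =>
    intro x hx
    cases x with
    | nil => simp [R, repAya, repYe, repWoo, repMa, rep_nil, okB]
    | cons c t =>
      simp only [List.length_cons] at hx
      simp only [okB]
      by_cases h1 : ['a','y','a'].isPrefixOf (c :: t)
      · obtain ⟨u, hu⟩ := List.isPrefixOf_iff_prefix.mp h1
        simp only [List.cons_append, List.nil_append] at hu
        injection hu with hc ht
        subst hc; subst ht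
        rw [if_pos h1, R_aya]
        simp only [List.all_cons, List.drop_succ_cons, List.drop_zero]
        rw [ih u (by simp only [List.length_cons] at hx; omega), (by decide : PySem.Chars.isspace ' ' = true), Bool.true_and]
      rw [if_neg h1]
      by_cases h2 : ['y','e'].isPrefixOf (c :: t)
      · obtain ⟨u, hu⟩ := List.isPrefixOf_iff_prefix.mp h2
        simp only [List.cons_append, List.nil_append] at hu
        injection hu with hc ht
        subst hc; subst ht
        rw [if_pos h2, R_ye]
        simp only [List.all_cons, List.drop_succ_cons, List.drop_zero]
        rw [ih u (by simp only [List.length_cons] at hx; omega), (by decide : PySem.Chars.isspace ' ' = true), Bool.true_and]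
      rw [if_neg h2]
      by_cases h3 : ['w','o','o'].isPrefixOf (c :: t)
      · obtain ⟨u, hu⟩ := List.isPrefixOf_iff_prefix.mp h3
        simp only [List.cons_append, List.nil_append] at hu
        injection hu with hc ht
        subst hc; subst ht
        rw [if_pos h3, R_woo]
        simp only [List.all_cons, List.drop_succ_cons, List.drop_zero]
        rw [ih u (by simp only [List.length_cons] at hx; omega), (by decide : PySem.Chars.isspace ' ' = true), Bool.true_and]
      rw [if_neg h3]
      by_cases h4 : ['m','a'].isPrefixOf (c :: t)
      · obtain ⟨u, hu⟩ := List.isPrefixOf_iff_prefix.mp h4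
        simp only [List.cons_append, List.nil_append] at hu
        injection hu with hc ht
        subst hc; subst ht
        rw [if_pos h4]
        simp only [List.drop_succ_cons, List.drop_zero]
        by_cases h5 : ['y','a'].isPrefixOf u
        · obtain ⟨v, hv⟩ := List.isPrefixOf_iff_prefix.mp h5
          simp only [List.cons_append, List.nil_append] at hv
          subst hv
          rw [R_ma_aya]
          simp only [List.all_cons]
          rw [(by decide : PySem.Chars.isspace 'm' = false), Bool.false_and]
          simp [okB, List.isPrefixOf, (by decide : PySem.Chars.isspace 'y' = false)]
        · rw [R_ma u (bfalse _ h5)]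
          simp only [List.all_cons]
          rw [ih u (by simp only [List.length_cons] at hx; omega), (by decide : PySem.Chars.isspace ' ' = true), Bool.true_and]
      rw [if_neg h4,
        R_cons_else c t (bfalse _ h1) (bfalse _ h2) (bfalse _ h3) (bfalse _ h4)]
      simp only [List.all_cons]
      rw [ih t (by omega)]
      cases hsp : PySem.Chars.isspace c
      · simp
      · simp

lemma main_lemma (x : List Char) : (R x).all PySem.Chars.isspace = okB x :=
  main_aux x.length x le_rfl

lemma step_toList (a cur : String) (h : a.toList ≠ []) :
    (if PySem.Str.isIn a cur then PySem.Str.replace cur a " " else cur).toList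
      = rep a.toList cur.toList := by
  by_cases hin : PySem.Str.isIn a cur
  · rw [if_pos hin, PySem.Str.toList_replace,
      (by rfl : (" " : String).toList = [' '])]
    exact replace_eq_rep _ _ h
  · rw [if_neg hin]
    exact (rep_not_infix a.toList cur.toList
      (fun hinf => hin ((PySem.Str.isIn_iff_infix a cur).mpr hinf))).symm

lemma per_string (s : String) :
    (PySem.Str.len (PySem.Str.strip
        ((["aya", "ye", "woo", "ma"] : List String).foldl
          (fun cur a => if PySem.Str.isIn a cur then PySem.Str.replace cur a " " else cur) s))
      == 0)
      = okB s.toList := by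
  rw [PySem.Str.len_eq, PySem.Str.toList_strip]
  simp only [List.foldl_cons, List.foldl_nil]
  rw [step_toList "ma" _ (by decide), step_toList "woo" _ (by decide),
    step_toList "ye" _ (by decide), step_toList "aya" _ (by decide),
    (by decide : ("ma" : String).toList = ['m','a']),
    (by decide : ("woo" : String).toList = ['w','o','o']),
    (by decide : ("ye" : String).toList = ['y','e']),
    (by decide : ("aya" : String).toList = ['a','y','a'])]
  show ((↑(PySem.Chars.strip (R s.toList)).length : Int) == 0) = okB s.toList
  cases hok : okB s.toList
  · have hne : PySem.Chars.strip (R s.toList) ≠ [] := by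
      intro hh
      have hall := (strip_nil_iff _).mp hh
      rw [main_lemma s.toList, hok] at hall
      exact Bool.false_ne_true hall
    simp [beq_eq_false_iff_ne, List.length_eq_zero_iff, hne]
  · have hall : (R s.toList).all PySem.Chars.isspace = true := by
      rw [main_lemma s.toList, hok]
    rw [(strip_nil_iff _).mpr hall]
    rfl

lemma solution_eq (babbling : List String) : solution babbling = solution_alt babbling := by
  have h1 := PySem.List.foldl_pyRange_pyGetD (β := Int) babbling "" (fun answer cur0 =>
      if PySem.Str.len (PySem.Str.strip
          ((["aya", "ye", "woo", "ma"] : List String).foldl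
            (fun cur a => if PySem.Str.isIn a cur then PySem.Str.replace cur a " " else cur)
            cur0)) == 0
      then answer + 1 else answer) 0 le_rfl
  have h2 := PySem.List.foldl_congr_mem (β := Int) babbling (fun answer cur0 =>
      if PySem.Str.len (PySem.Str.strip
          ((["aya", "ye", "woo", "ma"] : List String).foldl
            (fun cur a => if PySem.Str.isIn a cur then PySem.Str.replace cur a " " else cur)
            cur0)) == 0
      then answer + 1 else answer)
    (fun answer s => if okB s.toList = true then answer + 1 else answer) 0
    (fun acc x _ => by simp only [per_string x])
  have h3 := PySem.List.foldl_count_if (fun s => okB s.toList) babbling (0 : Int)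
  calc solution babbling
      = List.foldl (fun answer cur0 =>
      if PySem.Str.len (PySem.Str.strip
          ((["aya", "ye", "woo", "ma"] : List String).foldl
            (fun cur a => if PySem.Str.isIn a cur then PySem.Str.replace cur a " " else cur)
            cur0)) == 0
      then answer + 1 else answer) 0 (List.drop (0 : Int).toNat babbling) := by unfold solution; exact h1
    _ = List.foldl (fun answer cur0 =>
      if PySem.Str.len (PySem.Str.strip
          ((["aya", "ye", "woo", "ma"] : List String).foldl
            (fun cur a => if PySem.Str.isIn a cur then PySem.Str.replace cur a " " else cur)
            cur0)) == 0
      then answer + 1 else answer) 0 babbling := by rw [Int.toNat_zero, List.drop_zero]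
    _ = List.foldl (fun answer s => if okB s.toList = true then answer + 1 else answer)
          0 babbling := h2
    _ = 0 + ((babbling.countP (fun s => okB s.toList) : Nat) : Int) := h3
    _ = solution_alt babbling := by rw [solution_alt, zero_add]

-- ===== VERDICT (by name: the statement is the Claim_ definition above) =====
theorem solution_spec : Claim_equal_solution := by
  intro babbling _
  unfold Spec_solution
  exact solution_eq babbling
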